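-- pv_equiv track=rewrite | github.com/codedbyminjae/web-crawling | week00/ex10.py | solution
-- ===== SOURCE A (Python) =====
-- def solution(N, M):
--     day = 0
--     while N > 0:
--         day += 1
--         N -= 1
--         if day % M == 0:
--             N += 1
--     return day
-- ===== SOURCE B (Python) =====
-- def solution(N, M):
--     # Closed form: between consecutive refills the stock drops by M - 1,
--     # so depletion takes N plus one extra day per completed refill block.
--     if N <= 0:
--         return 0
--     return N + (N - 1) // (M - 1)
-- ===== Notes on version B (the rewrite author's own statement) =====
-- stated objective: faster
-- what changed: Replaces the day-by-day simulation loop with the closed-form formula N + (N-1)//(M-1); Pre_ keeps the natural domain (refill period M >= 2, or nothing to deplete), excluding M = 0 (A raises ZeroDivisionError), |M| = 1 (A loops forever) and negative periods, a meaningless corner where A's value is an artefact of Python's signed modulo.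
-- outside the precondition, e.g. on solution(5, -3): A returns 7, B returns 4
import Mathlib
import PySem

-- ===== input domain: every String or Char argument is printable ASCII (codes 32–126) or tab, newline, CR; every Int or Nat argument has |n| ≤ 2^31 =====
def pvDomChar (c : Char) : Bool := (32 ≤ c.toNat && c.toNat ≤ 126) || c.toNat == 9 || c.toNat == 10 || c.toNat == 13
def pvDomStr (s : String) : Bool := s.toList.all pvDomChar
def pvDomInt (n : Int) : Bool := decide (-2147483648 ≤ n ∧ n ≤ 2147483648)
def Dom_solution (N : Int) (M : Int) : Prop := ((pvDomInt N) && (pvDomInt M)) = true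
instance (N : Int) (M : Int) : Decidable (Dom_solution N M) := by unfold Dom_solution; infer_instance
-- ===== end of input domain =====

-- B replaces A's day-by-day simulation with a closed-form formula (asymptotically faster).
-- Pre_solution keeps the natural domain (M ≥ 2, or N ≤ 0 with nothing to deplete):
-- with N > 0 A raises ZeroDivisionError at M = 0, loops forever at |M| = 1, and for
-- negative M returns a value that is only an artefact of Python's signed modulo.


-- ===== PORT A =====
-- fuel makes the while-loop total; under Pre_solution the loop runs at most 2N-1
-- iterations, so the fuel 2*N.toNat + 2 never runs out (proved below).
def solutionLoop : Nat → Int → Int → Int → Int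
  | 0, day, _, _ => day
  | fuel + 1, day, N, M =>
    if N > 0 then
      let day' := day + 1
      let N' := N - 1
      let N'' := if PySem.Int.mod day' M = 0 then N' + 1 else N'
      solutionLoop fuel day' N'' M
    else day

def solution (N : Int) (M : Int) : Int := solutionLoop (2 * N.toNat + 2) 0 N M

-- ===== PORT B =====
def solution_alt (N : Int) (M : Int) : Int :=
  if N ≤ 0 then 0
  else N + PySem.Int.floordiv (N - 1) (M - 1)

-- ===== PRECONDITION & SPEC =====
-- The natural domain: a positive refill period M ≥ 2, or N ≤ 0 (nothing to deplete).
-- This excludes, for N > 0: M = 0 where A raises ZeroDivisionError, |M| = 1 where A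
-- loops forever, and M ≤ -2, a meaningless negative period on which A's returned value
-- is an accident of Python's signed modulo (day % -M == 0 iff day % M == 0).
def Pre_solution (N : Int) (M : Int) : Prop := N ≤ 0 ∨ 2 ≤ M
instance (N : Int) (M : Int) : Decidable (Pre_solution N M) := by unfold Pre_solution; infer_instance
def pvWitness_solution : Int × Int := (5, 3)

def Spec_solution (N : Int) (M : Int) (out : Int) : Prop := out = solution_alt N M
instance (N : Int) (M : Int) (out : Int) : Decidable (Spec_solution N M out) := by unfold Spec_solution; infer_instance

-- ===== CLAIM (what is proved, stated in full; the proofs are below) =====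
def Claim_equal_solution : Prop := ∀ (N : Int) (M : Int), Dom_solution N M → Pre_solution N M → Spec_solution N M (solution N M)

-- ===== LEMMAS AND PROOFS =====

theorem solutionLoop_nonpos (fuel : Nat) (day N M : Int) (h : ¬ N > 0) :
    solutionLoop fuel day N M = day := by
  cases fuel with
  | zero => rfl
  | succ f => simp [solutionLoop, h]

-- For M ≥ 2, Python's `day % M == 0` is divisibility by M.
theorem pymod_zero_iff (d M : Int) (hm : 2 ≤ M) :
    (PySem.Int.mod d M = 0) ↔ d % M = 0 := by
  rw [PySem.Int.mod_eq_zero_iff_dvd]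
  exact ⟨Int.emod_eq_zero_of_dvd, Int.dvd_of_emod_eq_zero⟩

-- Loop invariant: from state (day, N) with N > 0, the loop returns
-- day + N + (N - 1 + day % M) / (M - 1), given enough fuel.
theorem solutionLoop_eq (M : Int) (hm : 2 ≤ M) :
    ∀ (fuel : Nat) (day N : Int), 0 ≤ day → 0 < N →
      N + (N - 1 + day % M) / (M - 1) ≤ (fuel : Int) →
      solutionLoop fuel day N M = day + N + (N - 1 + day % M) / (M - 1) := by
  have hm1 : (0:Int) < M - 1 := by omega
  intro fuel
  induction fuel with
  | zero =>
    intro day N hday hN hfuel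
    exfalso
    have hr : 0 ≤ day % M := Int.emod_nonneg day (by omega)
    have : 0 ≤ (N - 1 + day % M) / (M - 1) := Int.ediv_nonneg (by omega) (by omega)
    simp only [Nat.cast_zero] at hfuel; omega
  | succ f ih =>
    intro day N hday hN hfuel
    have hr0 : 0 ≤ day % M := Int.emod_nonneg day (by omega)
    have hrlt : day % M < M := Int.emod_lt_of_pos day (by omega)
    simp only [solutionLoop, if_pos hN]
    by_cases hz : (day + 1) % M = 0
    · -- refill day: N is unchanged, and day % M = M - 1
      rw [if_pos ((pymod_zero_iff (day + 1) M hm).mpr hz)]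
      have h1m : (1:Int) % M = 1 := Int.emod_eq_of_lt (by omega) (by omega)
      have hrm : day % M = M - 1 := by
        have h1 : (day + 1) % M = (day % M + 1) % M := by
          rw [Int.add_emod, h1m]
        by_cases hc : day % M = M - 1
        · exact hc
        · exfalso
          have : (day % M + 1) % M = day % M + 1 :=
            Int.emod_eq_of_lt (by omega) (by omega)
          omega
      have hsplit : (N - 1 + day % M) / (M - 1) = (N - 1) / (M - 1) + 1 := by
        rw [hrm]
        have := Int.add_mul_ediv_right (N - 1) 1 (by omega : M - 1 ≠ 0)
        simpa using this
      have e1 : N - 1 + 1 - 1 + ((day + 1) % M) = N - 1 := by rw [hz]; ring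
      have hstep := ih (day + 1) (N - 1 + 1) (by omega) (by omega)
        (by rw [e1]; push_cast at hfuel ⊢; omega)
      rw [e1] at hstep
      rw [hstep]
      omega
    · -- ordinary day: N decreases by 1
      rw [if_neg (fun h => hz ((pymod_zero_iff (day + 1) M hm).mp h))]
      have h1m : (1:Int) % M = 1 := Int.emod_eq_of_lt (by omega) (by omega)
      have hstep1 : (day + 1) % M = day % M + 1 := by
        have h1 : (day + 1) % M = (day % M + 1) % M := by
          rw [Int.add_emod, h1m]
        have hne : day % M + 1 ≠ M := by
          intro h; rw [h1, h] at hz; exact hz Int.emod_self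
        rw [h1, Int.emod_eq_of_lt (by omega) (by omega)]
      have hrlt2 : day % M + 1 < M := by
        rw [← hstep1]; exact Int.emod_lt_of_pos _ (by omega)
      by_cases hN1 : N = 1
      · -- N hits 0: the loop stops on the next check
        subst hN1
        rw [solutionLoop_nonpos f (day + 1) (1 - 1) M (by omega)]
        have : (1 - 1 + day % M) / (M - 1) = 0 :=
          Int.ediv_eq_zero_of_lt (by omega) (by omega)
        omega
      · have e2 : N - 1 - 1 + (day % M + 1) = N - 1 + day % M := by ring
        have hstep := ih (day + 1) (N - 1) (by omega) (by omega)
          (by rw [hstep1, e2]; push_cast at hfuel ⊢; omega)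
        rw [hstep1, e2] at hstep
        rw [hstep]
        omega

-- ===== VERDICT (by name: the statement is the Claim_ definition above) =====
theorem solution_spec : Claim_equal_solution := by
  intro N M _ hpre
  unfold Spec_solution solution solution_alt
  by_cases hN : N ≤ 0
  · rw [solutionLoop_nonpos _ _ _ _ (by omega), if_pos hN]
  · have hNpos : 0 < N := by omega
    have hm : 2 ≤ M := by rcases hpre with h | h <;> omega
    have hdiv : (N - 1) / (M - 1) ≤ N - 1 :=
      Int.ediv_le_self (M - 1) (by omega)
    have hdiv0 : 0 ≤ (N - 1) / (M - 1) := Int.ediv_nonneg (by omega) (by omega)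
    rw [solutionLoop_eq M hm (2 * N.toNat + 2) 0 N le_rfl hNpos
      (by simp only [Int.zero_emod, add_zero]; push_cast; omega)]
    rw [if_neg hN, PySem.Int.floordiv_eq_ediv_of_pos (by omega)]
    simp only [Int.zero_emod, add_zero]
    omega
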